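-- pv_equiv track=rewrite | github.com/kevinwindisch/First-Year-Projects | snekoban.py | victory_check
-- ===== SOURCE A (Python) =====
-- def victory_check(game):
--     """
--     Given a game representation (of the form returned from new_game), return
--     a Boolean: True if the given game satisfies the victory condition, and
--     False otherwise.
--     """
--     num_targets = 0
--     for position in game:
--         if "target" in game[position]:
--             num_targets += 1
--             if "computer" not in game[position]:
--                 return False
--     if not num_targets:  # checks if no targets
--         return False
--     return True
-- ===== SOURCE B (Python) =====
-- def victory_check(game):
--     """
--     Given a game representation (of the form returned from new_game), return
--     a Boolean: True if the given game satisfies the victory condition, and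
--     False otherwise.
--     """
--     targets = {p for p in game if "target" in game[p]}
--     computers = {p for p in game if "computer" in game[p]}
--     return bool(targets) and targets <= computers
-- ===== Notes on version B (the rewrite author's own statement) =====
-- stated objective: simpler
-- what changed: Replaces the interleaved single pass with a counter and early return by materializing the set of target positions and the set of computer positions and returning bool(targets) and targets <= computers (one subset test).
import Mathlib
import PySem

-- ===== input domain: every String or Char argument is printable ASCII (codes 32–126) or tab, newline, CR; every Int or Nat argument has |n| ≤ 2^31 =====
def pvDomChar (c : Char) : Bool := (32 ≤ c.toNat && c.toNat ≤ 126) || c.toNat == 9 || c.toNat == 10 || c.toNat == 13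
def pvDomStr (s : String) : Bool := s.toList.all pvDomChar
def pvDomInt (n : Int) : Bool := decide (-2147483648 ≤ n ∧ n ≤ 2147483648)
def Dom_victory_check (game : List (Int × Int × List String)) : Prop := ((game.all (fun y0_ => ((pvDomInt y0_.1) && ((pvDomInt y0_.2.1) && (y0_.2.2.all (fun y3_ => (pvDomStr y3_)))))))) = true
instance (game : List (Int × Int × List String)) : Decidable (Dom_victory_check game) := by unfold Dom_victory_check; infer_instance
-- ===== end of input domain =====

-- B replaces A's interleaved counting pass with early return by two position
-- sets (targets, computers) and a single subset test; objective: simpler.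

-- ===== PORT A =====
-- game[position]: first-match dict lookup (keys come from the dict itself, so it is always found)
def vcGetA (d : List (Int × Int × List String)) (p : Int × Int) : List String :=
  match d.find? (fun e => (e.1, e.2.1) == p) with
  | some e => e.2.2
  | none => []

-- the 'for position in game' loop carrying num_targets, then the final 'if not num_targets'
def vcLoopA (d : List (Int × Int × List String)) :
    List (Int × Int × List String) → Int → Bool
  | [], n => !(n == 0)
  | e :: rest, n =>
    let v := vcGetA d (e.1, e.2.1)
    if v.contains "target" then
      if !(v.contains "computer") then false
      else vcLoopA d rest (n + 1)
    else vcLoopA d rest n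

def victory_check (game : List (Int × Int × List String)) : Bool :=
  vcLoopA game game 0

-- ===== PORT B =====
def vcGetB (d : List (Int × Int × List String)) (p : Int × Int) : List String :=
  ((d.find? (fun e => (e.1, e.2.1) == p)).map (fun e => e.2.2)).getD []

def victory_check_alt (game : List (Int × Int × List String)) : Bool :=
  let keys := game.map (fun e => (e.1, e.2.1))
  let targets : PySem.Set (Int × Int) :=
    PySem.Set.ofList (keys.filter (fun p => (vcGetB game p).contains "target"))
  let computers : PySem.Set (Int × Int) :=
    PySem.Set.ofList (keys.filter (fun p => (vcGetB game p).contains "computer"))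
  !targets.isEmpty && PySem.Set.issubset targets computers

-- ===== PRECONDITION & SPEC =====
def Spec_victory_check (game : List (Int × Int × List String)) (out : Bool) : Prop := out = victory_check_alt game
instance (game : List (Int × Int × List String)) (out : Bool) : Decidable (Spec_victory_check game out) := by unfold Spec_victory_check; infer_instance

-- ===== CLAIM (what is proved, stated in full; the proofs are below) =====
def Claim_equal_victory_check : Prop := ∀ (game : List (Int × Int × List String)), Dom_victory_check game → Spec_victory_check game (victory_check game)

-- ===== LEMMAS AND PROOFS =====

-- A's loop computes: every target cell has a computer, AND (counter already nonzero OR some target seen)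
theorem vcLoopA_eq (d : List (Int × Int × List String))
    (l : List (Int × Int × List String)) (n : Int) (hn : 0 ≤ n) :
    vcLoopA d l n =
      ((l.all fun e => !(vcGetA d (e.1, e.2.1)).contains "target"
                        || (vcGetA d (e.1, e.2.1)).contains "computer")
        && ((!(n == 0)) || l.any fun e => (vcGetA d (e.1, e.2.1)).contains "target")) := by
  induction l generalizing n with
  | nil => simp [vcLoopA]
  | cons e rest ih =>
    by_cases ht : "target" ∈ vcGetA d (e.1, e.2.1)
    · by_cases hc : "computer" ∈ vcGetA d (e.1, e.2.1)
      · have h1 : ((n + 1 : Int) == 0) = false := by simp; omega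
        simp [vcLoopA, ht, hc, ih (n + 1) (by omega), h1]
      · simp [vcLoopA, ht, hc]
    · simp [vcLoopA, ht, ih n hn]

theorem ofList_isEmpty {α : Type} [BEq α] [LawfulBEq α] (xs : List α) :
    (PySem.Set.ofList xs).isEmpty = xs.isEmpty := by
  cases xs with
  | nil => rfl
  | cons x xs => simp [PySem.Set.ofList_cons]

-- ===== VERDICT (by name: the statement is the Claim_ definition above) =====
theorem victory_check_spec : Claim_equal_victory_check := by
  intro game _
  show victory_check game = victory_check_alt game
  have hget : vcGetB = vcGetA := by
    funext d p
    unfold vcGetB vcGetA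
    cases d.find? (fun e => (e.1, e.2.1) == p) <;> rfl
  unfold victory_check victory_check_alt
  rw [vcLoopA_eq game game 0 le_rfl, hget]
  rw [Bool.eq_iff_iff]
  simp only [Bool.and_eq_true, Bool.or_eq_true, Bool.not_eq_true', List.all_eq_true,
    List.any_eq_true, ofList_isEmpty, List.isEmpty_eq_false_iff,
    PySem.Set.issubset_iff, PySem.Set.mem_ofList, List.mem_filter, List.mem_map,
    beq_self_eq_true, Bool.true_eq_false, false_or]
  constructor
  · rintro ⟨hall, e, he, hte⟩
    refine ⟨?_, ?_⟩
    · intro h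
      rw [List.filter_eq_nil_iff] at h
      exact absurd hte (by simpa using h (e.1, e.2.1) (List.mem_map_of_mem he))
    · rintro p ⟨⟨e', he', rfl⟩, htp⟩
      refine ⟨⟨e', he', rfl⟩, ?_⟩
      rcases hall e' he' with h | h
      · rw [htp] at h; cases h
      · exact h
  · rintro ⟨hne, hsub⟩
    rw [ne_eq, List.filter_eq_nil_iff] at hne
    push_neg at hne
    obtain ⟨p, hpmem, htp⟩ := hne
    obtain ⟨e, he, rfl⟩ := List.mem_map.mp hpmem
    refine ⟨?_, e, he, by simpa using htp⟩
    intro e' he'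
    by_cases ht' : (vcGetA game (e'.1, e'.2.1)).contains "target" = true
    · exact Or.inr (hsub _ ⟨⟨e', he', rfl⟩, ht'⟩).2
    · exact Or.inl (by simpa using ht')
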